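-- pv_equiv track=rewrite | github.com/Vusiss/Systems_Engineering_Courses | Sem II/WstępDoAlgorytmów/Lista5_zadanie1_WiktorKuśnierkiewicz.py | get_similar
-- ===== SOURCE A (Python) =====
-- def calculate_distance(base_string, another_string):
--
--     # A jest rózne od a, więc zamieniamy wszystkie znaki na duze litery
--     base_string = base_string.upper()
--     another_string = another_string.upper()
--
--     # Jezeli ktoś jest głupi i wprowadzi ciągi znaków o róznej długości, to funkcja zwróci tekst. Nie ma tego w zadaniu, ale to zawarłem
--
--     if len(base_string) != len(another_string):
--         return "Strings have diffrent lenghts"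
--
--     else:
--
--         # Dla znaków na poszczególnych pozycjach sprawdzane jest czy są takie same. Jezeli nie, to dystans zwiększany jest o 1
--         # Np. Sprawdzane jest dla słów "sowa" i "kawa" s != k, więc distance +=1
--
--         distance = 0
--         for i in range(len(base_string)):
--             if base_string[i] != another_string[i]:
--                 distance +=1
--         return distance     # Program zwraca odległość Hamminga
--
-- dictionary = [
--     "telefon", "motor", "klawiatura", "kamera", "komputer", "internet", "program", "ekran", "strona", "dysk",
-- "klikanie", "folwark", "sklepik", "kod", "grafika", "formatowanie", "ramka", "stacja", "wirus", "auto", "serwer",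
-- "hasło", "login", "system", "klucz", "backup", "folder", "zasilacz", "procesor", "port", "Polska",
-- "stylus", "router", "adres", "mail", "folderek", "drukarka", "skaner", "sterownik", "aplikacja", "spacja",
-- "antena", "smartfon", "aparat", "platforma", "fotografia", "monitor", "plik", "lupa", "kompilator", "obraz",
-- "połączenie", "serwis", "antywirus", "pop-up", "browser", "rejestr", "ciastko", "klik", "transfer", "oko",
-- "gitara", "studio", "mikrofon", "słuchawki", "notebook", "tablet", "konsola", "kontakt", "kalendarz", "sklep",
-- "programista", "test", "projekt", "edycja", "licencja", "upał", "analog", "cyfrowy", "model", "prototyp",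
-- "numer", "kodowanie", "klasa", "tekst", "interfejs", "wydruk", "obliczenia", "import", "eksport", "łącz",
-- "zestaw", "baza", "format", "link", "atlas", "prezentacja", "info", "instrukcja", "monitoring", "analogia"
-- ]
--
-- def get_similar(word):
--     if word in dictionary:
--         return "OK"
--     else:
--
--         # Przesiewamy słownik zostawiając tylko słowa o takiej samej długości jak wprowadzony ciąg znaków
--
--         similar_dictionary = []
--         for i in range(len(dictionary)):
--             if len(word) == len(dictionary[i]):
--                 similar_dictionary.append(dictionary[i])
--
--         # Znajdujemy najbardziej podobne słowo za pomocą odległości Hamminga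
--
--         similar = similar_dictionary[0]
--         for i in range(len(similar_dictionary)):
--             if calculate_distance(word,similar) > calculate_distance(word,similar_dictionary[i]):
--                 similar = similar_dictionary[i]
--         return similar
-- ===== SOURCE B (Python) =====
-- dictionary = [
--     "telefon", "motor", "klawiatura", "kamera", "komputer", "internet", "program", "ekran", "strona", "dysk",
-- "klikanie", "folwark", "sklepik", "kod", "grafika", "formatowanie", "ramka", "stacja", "wirus", "auto", "serwer",
-- "hasło", "login", "system", "klucz", "backup", "folder", "zasilacz", "procesor", "port", "Polska",
-- "stylus", "router", "adres", "mail", "folderek", "drukarka", "skaner", "sterownik", "aplikacja", "spacja",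
-- "antena", "smartfon", "aparat", "platforma", "fotografia", "monitor", "plik", "lupa", "kompilator", "obraz",
-- "połączenie", "serwis", "antywirus", "pop-up", "browser", "rejestr", "ciastko", "klik", "transfer", "oko",
-- "gitara", "studio", "mikrofon", "słuchawki", "notebook", "tablet", "konsola", "kontakt", "kalendarz", "sklep",
-- "programista", "test", "projekt", "edycja", "licencja", "upał", "analog", "cyfrowy", "model", "prototyp",
-- "numer", "kodowanie", "klasa", "tekst", "interfejs", "wydruk", "obliczenia", "import", "eksport", "łącz",
-- "zestaw", "baza", "format", "link", "atlas", "prezentacja", "info", "instrukcja", "monitoring", "analogia"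
-- ]
--
-- def _distance(a, b):
--     # recursive case-insensitive Hamming distance on equal-length strings
--     if not a:
--         return 0
--     return int(a[0].upper() != b[0].upper()) + _distance(a[1:], b[1:])
--
-- def get_similar(word):
--     if word in dictionary:
--         return "OK"
--     best = None  # (word, cached distance)
--     for w in dictionary:
--         if len(w) == len(word):
--             d = _distance(word, w)
--             if best is None or d < best[1]:
--                 best = (w, d)
--     return best[0]  # None-subscript raises when no same-length word exists; A raises IndexError there
-- ===== Notes on version B (the rewrite author's own statement) =====
-- stated objective: alternative
-- what changed: A builds a same-length candidate list with an index loop and then repeatedly rescans it with a strict-> argmin loop that recomputes both distances at every step; B makes one fused element-wise pass over the dictionary, filtering and tracking the running (best word, cached best distance) pair, with a recursive char-wise distance instead of A's whole-string-upper index loop.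
import Mathlib
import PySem

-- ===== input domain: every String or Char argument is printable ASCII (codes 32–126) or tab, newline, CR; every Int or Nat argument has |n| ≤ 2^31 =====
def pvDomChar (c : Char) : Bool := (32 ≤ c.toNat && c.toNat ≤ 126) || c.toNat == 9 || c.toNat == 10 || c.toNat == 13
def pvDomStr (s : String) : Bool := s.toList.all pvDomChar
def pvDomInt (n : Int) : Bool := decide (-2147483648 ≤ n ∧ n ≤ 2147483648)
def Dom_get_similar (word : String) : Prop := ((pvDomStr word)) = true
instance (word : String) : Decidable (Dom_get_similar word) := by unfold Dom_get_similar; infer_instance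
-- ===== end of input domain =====

-- B replaces A's two-stage "index-filter then argmin rescan recomputing both distances" by one
-- fused element-wise pass carrying the running (best word, cached distance) pair, with a
-- recursive char-wise distance (objective: alternative).

-- ===== PORT A =====
def pyDictionary : List String := [
  "telefon", "motor", "klawiatura", "kamera", "komputer", "internet", "program", "ekran", "strona", "dysk",
  "klikanie", "folwark", "sklepik", "kod", "grafika", "formatowanie", "ramka", "stacja", "wirus", "auto", "serwer",
  "hasło", "login", "system", "klucz", "backup", "folder", "zasilacz", "procesor", "port", "Polska",
  "stylus", "router", "adres", "mail", "folderek", "drukarka", "skaner", "sterownik", "aplikacja", "spacja",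
  "antena", "smartfon", "aparat", "platforma", "fotografia", "monitor", "plik", "lupa", "kompilator", "obraz",
  "połączenie", "serwis", "antywirus", "pop-up", "browser", "rejestr", "ciastko", "klik", "transfer", "oko",
  "gitara", "studio", "mikrofon", "słuchawki", "notebook", "tablet", "konsola", "kontakt", "kalendarz", "sklep",
  "programista", "test", "projekt", "edycja", "licencja", "upał", "analog", "cyfrowy", "model", "prototyp",
  "numer", "kodowanie", "klasa", "tekst", "interfejs", "wydruk", "obliczenia", "import", "eksport", "łącz",
  "zestaw", "baza", "format", "link", "atlas", "prezentacja", "info", "instrukcja", "monitoring", "analogia"]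

-- returns str on unequal lengths, int otherwise (Python's untyped return) → Sum String Int;
-- base[i] is ported as pyGetD on toList: exact, since i comes from range(len(base)) and is in range
def calculate_distance (base_string another_string : String) : Sum String Int :=
  let base := PySem.Str.upper base_string
  let another := PySem.Str.upper another_string
  if PySem.Str.len base ≠ PySem.Str.len another then
    Sum.inl "Strings have diffrent lenghts"
  else
    Sum.inr ((PySem.List.pyRange 0 (PySem.Str.len base)).foldl
      (fun distance i =>
        if PySem.List.pyGetD base.toList i ' ' ≠ PySem.List.pyGetD another.toList i ' ' then
          distance + 1
        else distance) 0)

-- Python's 'int > int'; on int-vs-str Python would raise TypeError, which get_similar never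
-- reaches (it only compares distances of equal-length strings)
def pyGtIntSum (x y : Sum String Int) : Bool :=
  match x, y with
  | Sum.inr a, Sum.inr b => a > b
  | _, _ => false

def get_similar (word : String) : String :=
  if word ∈ pyDictionary then "OK"
  else
    let similar_dictionary :=
      (PySem.List.pyRange 0 (PySem.List.len pyDictionary)).foldl
        (fun acc i =>
          if PySem.Str.len word == PySem.Str.len (PySem.List.pyGetD pyDictionary i "") then
            acc ++ [PySem.List.pyGetD pyDictionary i ""]
          else acc) []
    -- similar_dictionary[0] raises IndexError when empty: those inputs are outside Pre_
    let similar := PySem.List.pyGetD similar_dictionary 0 ""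
    (PySem.List.pyRange 0 (PySem.List.len similar_dictionary)).foldl
      (fun similar i =>
        if pyGtIntSum (calculate_distance word similar)
            (calculate_distance word (PySem.List.pyGetD similar_dictionary i "")) then
          PySem.List.pyGetD similar_dictionary i ""
        else similar) similar

-- ===== PORT B =====
-- Source B's _distance: recursive char-wise case-insensitive mismatch count; the third arm is
-- Python's IndexError on b[0] (never reached: called on equal-length strings only)
def distAlt : List Char → List Char → Int
  | [], _ => 0
  | a :: as, b :: bs =>
      (if PySem.Chars.upperChar a ≠ PySem.Chars.upperChar b then 1 else 0) + distAlt as bs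
  | _ :: _, [] => 0

-- Source B's loop: one element-wise pass, the running best carried as Option (word, cached distance)
def scanBest (word : String) : List String → Option (String × Int) → Option (String × Int)
  | [], best => best
  | w :: ws, best =>
      scanBest word ws
        (if PySem.Str.len w == PySem.Str.len word then
           let d := distAlt word.toList w.toList
           match best with
           | none => some (w, d)
           | some p => if d < p.2 then some (w, d) else some p
         else best)

def get_similar_alt (word : String) : String :=
  if word ∈ pyDictionary then "OK"
  else
    match scanBest word pyDictionary none with
    | some p => p.1
    | none => ""   -- Python's best[0] subscripts None and raises here; outside Pre_

-- ===== PRECONDITION & SPEC =====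
-- The dictionary's word lengths are exactly 3..12, so A returns normally iff len(word) ∈ [3,12]
-- (otherwise similar_dictionary is empty and similar_dictionary[0] raises IndexError; B's
-- best[0] raises there too). No input on which A returns is excluded.
def Pre_get_similar (word : String) : Prop :=
  3 ≤ PySem.Str.len word ∧ PySem.Str.len word ≤ 12
instance (word : String) : Decidable (Pre_get_similar word) := by unfold Pre_get_similar; infer_instance
def pvWitness_get_similar : String := "xxx"

def Spec_get_similar (word : String) (out : String) : Prop := out = get_similar_alt word
instance (word : String) (out : String) : Decidable (Spec_get_similar word out) := by unfold Spec_get_similar; infer_instance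

-- ===== CLAIM (what is proved, stated in full; the proofs are below) =====
def Claim_equal_get_similar : Prop := ∀ (word : String), Dom_get_similar word → Pre_get_similar word → Spec_get_similar word (get_similar word)

-- ===== LEMMAS AND PROOFS =====

-- the index-driven mismatch count equals the zip-driven one, for equal-length lists
lemma dist_range_zip : ∀ (u v : List Char), u.length = v.length → ∀ (c : Int),
    (List.range u.length).foldl (fun d i => if u.getD i ' ' ≠ v.getD i ' ' then d + 1 else d) c
      = (u.zip v).foldl (fun d p => if p.1 ≠ p.2 then d + 1 else d) c := by
  intro u
  induction u with
  | nil =>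
      intro v h c
      cases v with
      | nil => rfl
      | cons b v => simp at h
  | cons a u ih =>
      intro v h c
      cases v with
      | nil => simp at h
      | cons b v =>
          have h' : u.length = v.length := by simpa using h
          rw [List.length_cons, List.range_succ_eq_map]
          simp only [List.foldl_cons, List.foldl_map, List.getD_cons_zero, List.getD_cons_succ,
            List.zip_cons_cons]
          exact ih v h' _

lemma dist_pyRange (u v : List Char) (h : u.length = v.length) :
    (PySem.List.pyRange 0 ((u.length : Int))).foldl
      (fun d i => if PySem.List.pyGetD u i ' ' ≠ PySem.List.pyGetD v i ' ' then d + 1 else d)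
      (0 : Int)
      = (u.zip v).foldl (fun d p => if p.1 ≠ p.2 then d + 1 else d) (0 : Int) := by
  rw [PySem.List.pyRange_zero_natCast, List.foldl_map]
  simp only [PySem.List.pyGetD_natCast]
  exact dist_range_zip u v h 0

-- the zip-fold over the uppercased lists is Source B's recursive char-wise distance
lemma zipfold_eq_distAlt : ∀ (u v : List Char), u.length = v.length → ∀ (c : Int),
    ((PySem.Chars.upper u).zip (PySem.Chars.upper v)).foldl
      (fun d p => if p.1 ≠ p.2 then d + 1 else d) c
      = c + distAlt u v := by
  intro u
  induction u with
  | nil => intro v h c; cases v with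
      | nil => simp [PySem.Chars.upper, distAlt]
      | cons b v => simp at h
  | cons a u ih =>
      intro v h c
      cases v with
      | nil => simp at h
      | cons b v =>
          have h' : u.length = v.length := by simpa using h
          have hu : PySem.Chars.upper (a :: u) = PySem.Chars.upperChar a :: PySem.Chars.upper u := by
            simp [PySem.Chars.upper]
          have hv : PySem.Chars.upper (b :: v) = PySem.Chars.upperChar b :: PySem.Chars.upper v := by
            simp [PySem.Chars.upper]
          rw [hu, hv, List.zip_cons_cons, List.foldl_cons, ih v h', distAlt]
          by_cases hc : PySem.Chars.upperChar a = PySem.Chars.upperChar b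
          · simp [hc]
          · simp [hc]; ring

-- on equal-length strings, A's calculate_distance is Sum.inr of Source B's _distance
set_option maxHeartbeats 1000000 in
lemma calc_eq_inr (word w : String) (h : PySem.Str.len word = PySem.Str.len w) :
    calculate_distance word w = Sum.inr (distAlt word.toList w.toList) := by
  have h0 : word.toList.length = w.toList.length := by
    simp only [PySem.Str.len_eq] at h; exact_mod_cast h
  have hlen : (PySem.Str.upper word).toList.length = (PySem.Str.upper w).toList.length := by
    simp [PySem.Str.upper, PySem.Chars.upper, h0]
  simp only [calculate_distance]
  split_ifs with hcond
  · exact absurd (by rw [PySem.Str.len_eq, PySem.Str.len_eq]; exact_mod_cast hlen) hcond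
  · congr 1
    rw [show PySem.Str.len (PySem.Str.upper word)
        = (((PySem.Str.upper word).toList.length : Nat) : Int) from PySem.Str.len_eq _]
    rw [dist_pyRange _ _ hlen]
    have hup : (PySem.Str.upper word).toList = PySem.Chars.upper word.toList := by
      simp [PySem.Str.upper]
    have hup' : (PySem.Str.upper w).toList = PySem.Chars.upper w.toList := by
      simp [PySem.Str.upper]
    rw [hup, hup', zipfold_eq_distAlt word.toList w.toList h0 0, zero_add]

def distKey (word w : String) : Int := distAlt word.toList w.toList

-- A's strict-> argmin rescan, seeded inside the list, is the running minimum under distKey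
lemma fold_argmin (word : String) : ∀ (t : List String) (h : String),
    PySem.Str.len word = PySem.Str.len h → (∀ x ∈ t, PySem.Str.len word = PySem.Str.len x) →
    t.foldl (fun sim x =>
        if pyGtIntSum (calculate_distance word sim) (calculate_distance word x) then x else sim) h
      = t.foldl (fun m x => if distKey word x < distKey word m then x else m) h := by
  intro t
  induction t with
  | nil => intro h _ _; rfl
  | cons a t ih =>
      intro h hh hall
      have ha : PySem.Str.len word = PySem.Str.len a := hall a List.mem_cons_self
      have htail : ∀ x ∈ t, PySem.Str.len word = PySem.Str.len x :=
        fun x hx => hall x (List.mem_cons_of_mem a hx)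
      simp only [List.foldl_cons, calc_eq_inr word h hh, calc_eq_inr word a ha]
      by_cases hc : distKey word a < distKey word h
      · rw [if_pos (by simp [pyGtIntSum, distKey] at hc ⊢; omega), if_pos hc]
        exact ih a ha htail
      · rw [if_neg (by simp [pyGtIntSum, distKey] at hc ⊢; omega), if_neg hc]
        exact ih h hh htail

-- A's index loop building similar_dictionary is the same-length filter
lemma sd_eq (word : String) :
    (PySem.List.pyRange 0 (PySem.List.len pyDictionary)).foldl
      (fun acc i =>
        if PySem.Str.len word == PySem.Str.len (PySem.List.pyGetD pyDictionary i "") then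
          acc ++ [PySem.List.pyGetD pyDictionary i ""]
        else acc) []
      = pyDictionary.filter (fun w => PySem.Str.len word == PySem.Str.len w) := by
  have h1 := PySem.List.foldl_pyRange_pyGetD pyDictionary ""
    (fun acc w => if PySem.Str.len word == PySem.Str.len w then acc ++ [w] else acc)
    ([] : List String) (a := 0) (le_refl 0)
  simp only [Int.toNat_zero, List.drop_zero] at h1
  rw [h1]
  simpa using PySem.List.foldl_append_if
    (fun w => PySem.Str.len word == PySem.Str.len w) (fun w => w) pyDictionary []

-- Source B's scan is an element fold
lemma scanBest_eq_foldl (word : String) : ∀ (l : List String) (st : Option (String × Int)),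
    scanBest word l st
      = l.foldl (fun best w =>
          if PySem.Str.len w == PySem.Str.len word then
            let d := distAlt word.toList w.toList
            match best with
            | none => some (w, d)
            | some p => if d < p.2 then some (w, d) else some p
          else best) st := by
  intro l
  induction l with
  | nil => intro st; rfl
  | cons w ws ih => intro st; rw [scanBest, List.foldl_cons, ih]

-- the filtered fold keeps the running minimum together with its cached distance
lemma fold_best_inv (word : String) : ∀ (t : List String) (b : String),
    t.foldl (fun best w =>
        let d := distAlt word.toList w.toList
        match best with
        | none => some (w, d)
        | some p => if d < p.2 then some (w, d) else some p)
      (some (b, distKey word b))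
      = some (t.foldl (fun m x => if distKey word x < distKey word m then x else m) b,
              distKey word (t.foldl (fun m x => if distKey word x < distKey word m then x else m) b)) := by
  intro t
  induction t with
  | nil => intro b; rfl
  | cons a t ih =>
      intro b
      simp only [List.foldl_cons]
      by_cases hc : distKey word a < distKey word b
      · rw [show (if distAlt word.toList a.toList < distKey word b
              then some (a, distAlt word.toList a.toList) else some (b, distKey word b))
            = some (a, distKey word a) from by simp [distKey] at hc ⊢; simp [hc],
          if_pos hc]
        exact ih a
      · rw [show (if distAlt word.toList a.toList < distKey word b
              then some (a, distAlt word.toList a.toList) else some (b, distKey word b))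
            = some (b, distKey word b) from by simp [distKey] at hc ⊢; simp [hc],
          if_neg hc]
        exact ih b

-- word lengths 3..12 are all realised in the dictionary
lemma exists_same_len (n : ℕ) (h1 : 3 ≤ n) (h2 : n ≤ 12) :
    ∃ w ∈ pyDictionary, PySem.Str.len w = (n : Int) := by
  interval_cases n
  · exact ⟨"kod", by decide, by decide⟩
  · exact ⟨"dysk", by decide, by decide⟩
  · exact ⟨"motor", by decide, by decide⟩
  · exact ⟨"kamera", by decide, by decide⟩
  · exact ⟨"telefon", by decide, by decide⟩
  · exact ⟨"komputer", by decide, by decide⟩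
  · exact ⟨"aplikacja", by decide, by decide⟩
  · exact ⟨"klawiatura", by decide, by decide⟩
  · exact ⟨"programista", by decide, by decide⟩
  · exact ⟨"formatowanie", by decide, by decide⟩

lemma pyGetD_zero_cons (h : String) (t : List String) :
    PySem.List.pyGetD (h :: t) 0 "" = h := by
  simp [PySem.List.pyGetD, PySem.List.pyGet?, PySem.List.pyIdx?]

-- ===== VERDICT (by name: the statement is the Claim_ definition above) =====
set_option maxHeartbeats 1000000 in
theorem get_similar_spec : Claim_equal_get_similar := by
  intro word _ hpre
  unfold Spec_get_similar
  by_cases hmem : word ∈ pyDictionary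
  · simp [get_similar, get_similar_alt, hmem]
  · obtain ⟨hp1, hp2⟩ := hpre
    have hn3 : 3 ≤ word.toList.length := by
      rw [PySem.Str.len_eq] at hp1; exact_mod_cast hp1
    have hn12 : word.toList.length ≤ 12 := by
      rw [PySem.Str.len_eq] at hp2; exact_mod_cast hp2
    obtain ⟨w0, hw0, hw0len⟩ := exists_same_len word.toList.length hn3 hn12
    have hw0' : (PySem.Str.len word == PySem.Str.len w0) = true := by
      simp only [beq_iff_eq]
      rw [hw0len]
      exact PySem.Str.len_eq word
    have hne : pyDictionary.filter (fun w => PySem.Str.len word == PySem.Str.len w) ≠ [] :=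
      List.ne_nil_of_mem (List.mem_filter.mpr ⟨hw0, hw0'⟩)
    cases hsd : pyDictionary.filter (fun w => PySem.Str.len word == PySem.Str.len w) with
    | nil => exact absurd hsd hne
    | cons h t =>
        have hall : ∀ x ∈ h :: t, PySem.Str.len word = PySem.Str.len x := by
          intro x hx
          rw [← hsd] at hx
          exact eq_of_beq (List.mem_filter.mp hx).2
        -- A's side
        simp only [get_similar, if_neg hmem, sd_eq word, hsd]
        have h2 := PySem.List.foldl_pyRange_pyGetD (h :: t) ""
          (fun sim x =>
            if pyGtIntSum (calculate_distance word sim) (calculate_distance word x) then x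
            else sim)
          (PySem.List.pyGetD (h :: t) 0 "") (a := 0) (le_refl 0)
        simp only [Int.toNat_zero, List.drop_zero] at h2
        rw [h2, pyGetD_zero_cons, List.foldl_cons, ite_self]
        rw [fold_argmin word t h (hall h List.mem_cons_self)
          (fun x hx => hall x (List.mem_cons_of_mem h hx))]
        -- B's side
        have hpred : ∀ w, (PySem.Str.len w == PySem.Str.len word)
            = (PySem.Str.len word == PySem.Str.len w) := by
          intro w; simp [eq_comm]
        simp only [get_similar_alt, if_neg hmem, scanBest_eq_foldl]
        have hfil := PySem.List.foldl_if_eq_foldl_filter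
          (fun w => PySem.Str.len w == PySem.Str.len word)
          (fun (best : Option (String × Int)) w =>
            let d := distAlt word.toList w.toList
            match best with
            | none => some (w, d)
            | some p => if d < p.2 then some (w, d) else some p)
          pyDictionary (none : Option (String × Int))
        rw [hfil, show pyDictionary.filter (fun w => PySem.Str.len w == PySem.Str.len word)
            = pyDictionary.filter (fun w => PySem.Str.len word == PySem.Str.len w) from
          List.filter_congr (fun w _ => hpred w), hsd, List.foldl_cons]
        rw [show (match (none : Option (String × Int)) with
            | none => some (h, distAlt word.toList h.toList)
            | some p => if distAlt word.toList h.toList < p.2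
                then some (h, distAlt word.toList h.toList) else some p)
          = some (h, distKey word h) from rfl]
        rw [fold_best_inv word t h]
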